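-- pv_equiv track=rewrite | github.com/VaHiX/CodeForces | Python/ByTier/D/1946_D_Birthday_Gift.py | find_targets
-- ===== SOURCE A (Python) =====
-- def find_targets(X):
--     # Convert X to binary string and pad to 31 bits
--     b = bin(X)[2:].zfill(31)
--     targets = [X]
--     entry = 0
--     # Iterate through each bit position
--     for i in range(31):
--         if b[i] == "1":
--             # Add a new target based on current bit
--             targets.append(entry + 2 ** (30 - i) - 1)
--         # Update entry for next iteration
--         entry = entry + int(b[i]) * 2 ** (30 - i)
--     return targets
-- ===== SOURCE B (Python) =====
-- def find_targets(X):
--     b = bin(X)[2:].zfill(31)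
--     return [X] + [int('0' + b[:i], 2) * 2 ** (31 - i) + 2 ** (30 - i) - 1
--                   for i in range(31) if b[i] == '1']
-- ===== Notes on version B (the rewrite author's own statement) =====
-- stated objective: alternative
-- what changed: Replaced the loop threading a running 'entry' accumulator with a stateless comprehension that recomputes each target directly by parsing the binary prefix b[:i], assembled as [X] plus a comprehension.
import Mathlib
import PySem

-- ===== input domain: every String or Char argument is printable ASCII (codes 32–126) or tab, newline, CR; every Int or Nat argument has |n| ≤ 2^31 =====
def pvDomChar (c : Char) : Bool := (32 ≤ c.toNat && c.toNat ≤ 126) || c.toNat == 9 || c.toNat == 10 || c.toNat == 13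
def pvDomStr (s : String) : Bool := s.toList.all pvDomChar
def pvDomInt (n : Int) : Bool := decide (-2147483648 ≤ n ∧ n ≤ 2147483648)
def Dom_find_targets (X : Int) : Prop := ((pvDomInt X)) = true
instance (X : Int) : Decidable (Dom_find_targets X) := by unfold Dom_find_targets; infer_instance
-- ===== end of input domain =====

-- B replaces A's running 'entry' accumulator by recomputing each target directly
-- from the binary prefix; same result, alternative (stateless) decomposition.

-- ===== PORT A =====
-- bin(n) for n > 0, msb first (digits of bin(X)[2:])
def pvBinAux (n : Nat) : List Char :=
  if h : n = 0 then []
  else pvBinAux (n / 2) ++ [if n % 2 == 1 then '1' else '0']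
decreasing_by exact Nat.div_lt_self (Nat.pos_of_ne_zero h) (by norm_num)

-- b = bin(X)[2:].zfill(31)  (exact for X ≥ 0; negative X raises in Python and is outside Pre_)
def pvB (X : Int) : List Char :=
  let s := if X = 0 then ['0'] else pvBinAux X.toNat
  List.replicate (31 - s.length) '0' ++ s

def find_targets (X : Int) : List Int :=
  let b := pvB X
  ((List.range 31).foldl (fun (st : List Int × Int) i =>
      ((if b.getD i ' ' == '1' then st.1 ++ [st.2 + 2 ^ (30 - i) - 1] else st.1),
       st.2 + (if b.getD i ' ' == '1' then 1 else 0) * 2 ^ (30 - i))) ([X], 0)).1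

-- ===== PORT B =====
-- int(cs, 2) for a list of '0'/'1' chars
def pvParseBin (cs : List Char) : Int :=
  cs.foldl (fun a c => 2 * a + (if c == '1' then 1 else 0)) 0

def find_targets_alt (X : Int) : List Int :=
  let b := pvB X
  X :: ((List.range 31).filter (fun i => b.getD i ' ' == '1')).map
      (fun i => pvParseBin ('0' :: b.take i) * 2 ^ (31 - i) + 2 ^ (30 - i) - 1)

-- ===== PRECONDITION & SPEC =====
-- Pre_ excludes negative X, on which Python's int() calls hit the letter of the
-- sign-stripped '-0b…' representation and both A and B raise ValueError.
def Pre_find_targets (X : Int) : Prop := 0 ≤ X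
instance (X : Int) : Decidable (Pre_find_targets X) := by unfold Pre_find_targets; infer_instance
def pvWitness_find_targets : Int := (5)

def Spec_find_targets (X : Int) (out : List Int) : Prop := out = find_targets_alt X
instance (X : Int) (out : List Int) : Decidable (Spec_find_targets X out) := by unfold Spec_find_targets; infer_instance

-- ===== CLAIM (what is proved, stated in full; the proofs are below) =====
def Claim_equal_find_targets : Prop := ∀ (X : Int), Dom_find_targets X → Pre_find_targets X → Spec_find_targets X (find_targets X)

-- ===== LEMMAS AND PROOFS =====

theorem pvParse_append (l : List Char) (c : Char) :
    pvParseBin (l ++ [c]) = 2 * pvParseBin l + (if c == '1' then 1 else 0) := by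
  simp [pvParseBin, List.foldl_append]

-- loop invariant: after n steps, targets = X :: mapped ones of the prefix, and
-- entry = (value of b[:n]) * 2^(31-n)
theorem pv_loop_inv (X : Int) (b : List Char) (hlen : 31 ≤ b.length) :
    ∀ n, n ≤ 31 →
    (List.range n).foldl (fun (st : List Int × Int) i =>
      ((if b.getD i ' ' == '1' then st.1 ++ [st.2 + 2 ^ (30 - i) - 1] else st.1),
       st.2 + (if b.getD i ' ' == '1' then 1 else 0) * 2 ^ (30 - i))) ([X], 0)
    = (X :: ((List.range n).filter (fun i => b.getD i ' ' == '1')).map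
        (fun i => pvParseBin ('0' :: b.take i) * 2 ^ (31 - i) + 2 ^ (30 - i) - 1),
       pvParseBin ('0' :: b.take n) * 2 ^ (31 - n)) := by
  intro n hn
  induction n with
  | zero => simp [pvParseBin]
  | succ m ih =>
    have hm : m ≤ 31 := Nat.le_of_succ_le hn
    have hmlt : m < b.length := lt_of_lt_of_le hn hlen
    have htake : b.take (m + 1) = b.take m ++ [b.getD m ' '] := by
      rw [List.take_add_one]
      simp [List.getD, List.getElem?_eq_getElem hmlt]
    have hparse : pvParseBin ('0' :: b.take (m + 1))
        = 2 * pvParseBin ('0' :: b.take m)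
          + (if b.getD m ' ' == '1' then 1 else 0) := by
      rw [htake, show ('0' :: (b.take m ++ [b.getD m ' ']))
            = ('0' :: b.take m) ++ [b.getD m ' '] by simp, pvParse_append]
    have hpow : (2 : Int) ^ (31 - m) = 2 * 2 ^ (30 - m) := by
      have : 31 - m = (30 - m) + 1 := by omega
      rw [this, pow_succ]; ring
    rw [List.range_succ, List.foldl_append, ih hm]
    simp only [List.foldl_cons, List.foldl_nil, List.filter_append, List.map_append]
    by_cases hb : b.getD m ' ' == '1'
    · simp only [hb, if_pos, List.filter_cons, List.filter_nil, Prod.mk.injEq]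
      constructor
      · simp
      · rw [hparse, hb]
        have h31 : 31 - (m + 1) = 30 - m := by omega
        rw [h31, hpow]; simp; ring
    · simp only [hb, if_neg, Bool.false_eq_true, not_false_iff, Prod.mk.injEq]
      constructor
      · simpa [List.getD] using hb
      · rw [hparse]
        simp only [hb, if_neg, Bool.false_eq_true, not_false_iff]
        have h31 : 31 - (m + 1) = 30 - m := by omega
        rw [h31, hpow]; simp; ring

theorem pvB_len (X : Int) : 31 ≤ (pvB X).length := by
  simp only [pvB, List.length_append, List.length_replicate]
  omega

-- ===== VERDICT (by name: the statement is the Claim_ definition above) =====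
theorem find_targets_spec : Claim_equal_find_targets := by
  intro X _ _
  unfold Spec_find_targets find_targets find_targets_alt
  simp only []
  rw [pv_loop_inv X (pvB X) (pvB_len X) 31 (le_refl 31)]
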